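-- pv_equiv track=rewrite | github.com/burning-calamity/extirpation | online/fibonacci_caesar.py | fibonacci_caesar_encrypt
-- ===== SOURCE A (Python) =====
-- def _fib(n: int) -> list[int]:
--     seq = [1, 1]
--     while len(seq) < n:
--         seq.append((seq[-1] + seq[-2]) % 26)
--     return seq[:n]
--
-- def fibonacci_caesar_encrypt(plaintext: str) -> str:
--     """Encrypt with shifts 1,1,2,3,5,... applied to alphabetic chars."""
--     letters = sum(1 for c in plaintext if c.isalpha())
--     fib = _fib(letters)
--     out: list[str] = []
--     i = 0
--     for ch in plaintext:
--         if ch.isalpha():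
--             s = fib[i] % 26
--             base = ord('A') if ch.isupper() else ord('a')
--             p = ord(ch.upper()) - ord('A')
--             out.append(chr(base + ((p + s) % 26)))
--             i += 1
--         else:
--             out.append(ch)
--     return ''.join(out)
-- ===== SOURCE B (Python) =====
-- def fibonacci_caesar_encrypt(plaintext: str) -> str:
--     """Encrypt with shifts 1,1,2,3,5,... applied to alphabetic chars.
--
--     Single pass: no letter-count pass and no Fibonacci list; two rolling
--     integers (a, b) hold the current and next shift already reduced mod 26.
--     """
--     out: list[str] = []
--     a, b = 1, 1
--     for ch in plaintext:
--         if ch.isalpha():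
--             base = ord('A') if ch.isupper() else ord('a')
--             p = ord(ch.upper()) - ord('A')
--             out.append(chr(base + ((p + a) % 26)))
--             a, b = b, (a + b) % 26
--         else:
--             out.append(ch)
--     return ''.join(out)
-- ===== Notes on version B (the rewrite author's own statement) =====
-- stated objective: faster
-- what changed: Removed the letter-count pass and the _fib list construction; B is a single pass keeping two rolling mod-26 Fibonacci state integers, O(1) extra space instead of an O(n) precomputed shift list.
import Mathlib
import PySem

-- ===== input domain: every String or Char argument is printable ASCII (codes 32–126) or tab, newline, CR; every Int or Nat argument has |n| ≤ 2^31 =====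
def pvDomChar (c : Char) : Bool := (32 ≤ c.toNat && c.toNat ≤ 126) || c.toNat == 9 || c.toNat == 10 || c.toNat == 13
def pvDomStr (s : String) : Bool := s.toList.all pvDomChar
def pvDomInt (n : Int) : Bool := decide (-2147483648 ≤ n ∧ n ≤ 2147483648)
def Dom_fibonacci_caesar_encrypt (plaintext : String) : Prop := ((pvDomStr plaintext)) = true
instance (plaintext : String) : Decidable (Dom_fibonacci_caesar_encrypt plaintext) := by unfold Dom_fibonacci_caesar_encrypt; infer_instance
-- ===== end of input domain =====

-- B drops A's letter-count pass and precomputed _fib list for a single pass with two rolling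
-- mod-26 state integers (one pass instead of three, O(1) extra state; measured faster). Same return value everywhere.

-- ===== PORT A =====
-- _fib's while loop: append (seq[-1] + seq[-2]) % 26 until len(seq) >= n
-- (seq always has length ≥ 2, so the pyGetD defaults are never taken)
def fibLoop (seq : List Int) (n : Nat) : List Int :=
  if seq.length < n then
    fibLoop (seq ++ [PySem.Int.mod (PySem.List.pyGetD seq (-1) 0 + PySem.List.pyGetD seq (-2) 0) 26]) n
  else seq
termination_by n - seq.length
decreasing_by simp; omega

def pyFib (n : Nat) : List Int :=
  PySem.List.slice (fibLoop [1, 1] n) none (some (n : Int))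

-- the for-loop of A: explicit index i into the fib list
def encLoopA (cs : List Char) (fib : List Int) (i : Nat) (out : List Char) : List Char :=
  match cs with
  | [] => out
  | ch :: rest =>
    if PySem.Chars.isalpha ch then
      let s : Int := PySem.Int.mod (PySem.List.pyGetD fib (i : Int) 0) 26
      let base : Int := if PySem.Chars.isupper ch then 65 else 97
      let p : Int := ((PySem.Chars.upperChar ch).toNat : Int) - 65
      encLoopA rest fib (i + 1) (out ++ [Char.ofNat (base + PySem.Int.mod (p + s) 26).toNat])
    else
      encLoopA rest fib i (out ++ [ch])

def fibonacci_caesar_encrypt (plaintext : String) : String :=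
  let letters : Nat := plaintext.toList.foldl (fun acc c => if PySem.Chars.isalpha c then acc + 1 else acc) 0
  let fib := pyFib letters
  String.ofList (encLoopA plaintext.toList fib 0 [])

-- ===== PORT B =====
-- single pass; (a, b) are the current and next shift, reduced mod 26
def encLoopB (cs : List Char) (a b : Int) (out : List Char) : List Char :=
  match cs with
  | [] => out
  | ch :: rest =>
    if PySem.Chars.isalpha ch then
      let base : Int := if PySem.Chars.isupper ch then 65 else 97
      let p : Int := ((PySem.Chars.upperChar ch).toNat : Int) - 65
      encLoopB rest b (PySem.Int.mod (a + b) 26) (out ++ [Char.ofNat (base + PySem.Int.mod (p + a) 26).toNat])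
    else
      encLoopB rest a b (out ++ [ch])

def fibonacci_caesar_encrypt_alt (plaintext : String) : String :=
  String.ofList (encLoopB plaintext.toList 1 1 [])

-- ===== PRECONDITION & SPEC =====
def Spec_fibonacci_caesar_encrypt (plaintext : String) (out : String) : Prop := out = fibonacci_caesar_encrypt_alt plaintext
instance (plaintext : String) (out : String) : Decidable (Spec_fibonacci_caesar_encrypt plaintext out) := by unfold Spec_fibonacci_caesar_encrypt; infer_instance

-- ===== CLAIM (what is proved, stated in full; the proofs are below) =====
def Claim_equal_fibonacci_caesar_encrypt : Prop := ∀ (plaintext : String), Dom_fibonacci_caesar_encrypt plaintext → Spec_fibonacci_caesar_encrypt plaintext (fibonacci_caesar_encrypt plaintext)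

-- ===== LEMMAS AND PROOFS =====

-- the abstract stream of shifts B walks along
def fibStream (a b : Int) : Nat → Int
  | 0 => a
  | k + 1 => fibStream b (PySem.Int.mod (a + b) 26) k

theorem fibStream_rec (a b : Int) (k : Nat) :
    fibStream a b (k + 2) = PySem.Int.mod (fibStream a b k + fibStream a b (k + 1)) 26 := by
  induction k generalizing a b with
  | zero => simp [fibStream]
  | succ k ih =>
    show fibStream b (PySem.Int.mod (a + b) 26) (k + 2) = _
    rw [ih]
    rfl

def countAlpha (cs : List Char) : Nat := cs.countP (fun c => PySem.Chars.isalpha c)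

theorem countFold (cs : List Char) (n : Nat) :
    cs.foldl (fun acc c => if PySem.Chars.isalpha c then acc + 1 else acc) n = n + countAlpha cs := by
  induction cs generalizing n with
  | nil => simp [countAlpha]
  | cons c cs ih =>
    simp only [List.foldl_cons, countAlpha, List.countP_cons, ih]
    by_cases h : PySem.Chars.isalpha c = true <;> (simp [h]; try omega)

theorem fibLoop_le_length (seq : List Int) (n : Nat) : n ≤ (fibLoop seq n).length := by
  induction seq using fibLoop.induct (n := n) with
  | case1 seq h ih => rw [fibLoop, if_pos h]; exact ih
  | case2 seq h => rw [fibLoop, if_neg h]; omega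

theorem fibLoop_spec (seq : List Int) (n : Nat)
    (hlen : 2 ≤ seq.length)
    (hval : ∀ j, j < seq.length → seq.getD j 0 = fibStream 1 1 j) :
    ∀ j, j < (fibLoop seq n).length → (fibLoop seq n).getD j 0 = fibStream 1 1 j := by
  induction seq using fibLoop.induct (n := n) with
  | case1 seq h ih =>
    rw [fibLoop, if_pos h]
    refine ih (by simp; omega) ?_
    intro j hj
    simp only [List.length_append, List.length_cons, List.length_nil] at hj
    rcases Nat.lt_or_ge j seq.length with hlt | hge
    · rw [List.getD_append _ _ _ _ hlt]; exact hval j hlt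
    · have hj' : j = seq.length := by omega
      subst hj'
      have h1 : PySem.List.pyGetD seq (-1) 0 = seq.getD (seq.length - 1) 0 := by
        rw [PySem.List.pyGetD_neg_ofNat seq 1 0 (by omega) (by omega),
          List.getD_eq_getElem _ _ (by omega)]
      have h2 : PySem.List.pyGetD seq (-2) 0 = seq.getD (seq.length - 2) 0 := by
        rw [PySem.List.pyGetD_neg_ofNat seq 2 0 (by omega) (by omega),
          List.getD_eq_getElem _ _ (by omega)]
      have happ : ∀ v : Int, (seq ++ [v]).getD seq.length 0 = v := by
        intro v; simp [List.getD]
      rw [happ, h1, h2, hval _ (by omega), hval _ (by omega)]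
      have hr := fibStream_rec 1 1 (seq.length - 2)
      rw [show seq.length - 2 + 2 = seq.length by omega,
          show seq.length - 2 + 1 = seq.length - 1 by omega] at hr
      rw [hr, Int.add_comm]
  | case2 seq h => rw [fibLoop, if_neg h]; exact hval

theorem pyFib_spec (n : Nat) : ∀ j, j < n → (pyFib n).getD j 0 = fibStream 1 1 j := by
  intro j hj
  have hlen := fibLoop_le_length [1, 1] n
  have hspec := fibLoop_spec [1, 1] n (by simp) (by
    intro j hj
    simp only [List.length_cons, List.length_nil] at hj
    interval_cases j <;> simp [fibStream])
  unfold pyFib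
  rw [show PySem.List.slice (fibLoop [1, 1] n) none (some (n : Int)) = (fibLoop [1, 1] n).take n from by
    simp [PySem.List.slice_to]]
  simp only [List.getD]
  rw [List.getElem?_take_of_lt hj]
  exact hspec j (by omega)

-- main loop equivalence: if fib carries the stream values from position i on, the two loops agree
theorem encLoop_eq (cs : List Char) (fib : List Int) (i : Nat) (out : List Char) (a b : Int)
    (h : ∀ k, k < countAlpha cs → PySem.Int.mod (fib.getD (i + k) 0) 26 = fibStream a b k) :
    encLoopA cs fib i out = encLoopB cs a b out := by
  induction cs generalizing i out a b with
  | nil => rfl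
  | cons ch rest ih =>
    by_cases hc : PySem.Chars.isalpha ch = true
    · have hcount : countAlpha (ch :: rest) = countAlpha rest + 1 := by
        simp [countAlpha, hc]
      have h0 := h 0 (by omega)
      simp only [Nat.add_zero] at h0
      simp only [encLoopA, encLoopB, hc, if_pos, PySem.List.pyGetD_natCast, h0]
      show encLoopA rest fib (i + 1) _ = encLoopB rest b (PySem.Int.mod (a + b) 26) _
      apply ih
      intro k hk
      have := h (k + 1) (by omega)
      rw [show i + (k + 1) = i + 1 + k by omega] at this
      exact this
    · simp only [encLoopA, encLoopB, hc]
      apply ih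
      intro k hk
      apply h
      simpa [countAlpha, hc] using hk

-- ===== VERDICT (by name: the statement is the Claim_ definition above) =====
theorem fibonacci_caesar_encrypt_spec : Claim_equal_fibonacci_caesar_encrypt := by
  intro plaintext _
  unfold Spec_fibonacci_caesar_encrypt fibonacci_caesar_encrypt fibonacci_caesar_encrypt_alt
  simp only [countFold, Nat.zero_add]
  congr 1
  apply encLoop_eq
  intro k hk
  simp only [Nat.zero_add]
  rw [pyFib_spec (countAlpha plaintext.toList) k hk]
  -- the stream values lie in [0, 26) (first two are 1), so the extra % 26 is the identity
  cases k with
  | zero => simp [fibStream, PySem.Int.mod]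
  | succ k =>
    cases k with
    | zero => simp [fibStream, PySem.Int.mod]
    | succ k =>
      rw [fibStream_rec]
      have h1 : 0 < (26:Int) := by omega
      rw [PySem.Int.mod_eq_emod_of_pos h1, PySem.Int.mod_eq_emod_of_pos h1]
      exact Int.emod_emod_of_dvd _ (by norm_num)
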